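-- pv_equiv track=rewrite | github.com/OpenGenus/cosmos | code/online_challenges/src/codechef/COINS/COINS.py | dollar
-- ===== SOURCE A (Python) =====
-- a = {}
--
-- def dollar(n):
--     if n <= 11:
--         a[n] = n
--         return a[n]
--     if n in a:
--         return a[n]
--     a[n] = max(n, dollar(int(n / 2)) + dollar(int(n / 3)) + dollar(int(n / 4)))
--     return a[n]
-- ===== SOURCE B (Python) =====
-- def dollar(n):
--     if n <= 11:
--         return n
--     divs = []
--     p = 1
--     while p <= n:
--         q = p
--         while q <= n:
--             divs.append(q)
--             q *= 3
--         p *= 2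
--     val = {}
--     for d in sorted(divs, reverse=True):
--         m = n // d
--         val[d] = m if m <= 11 else max(m, val[2 * d] + val[3 * d] + val[4 * d])
--     return val[1]
-- ===== Notes on version B (the rewrite author's own statement) =====
-- stated objective: alternative
-- what changed: Replaces A's top-down recursion memoized in a global dict by a bottom-up dynamic program: B generates the set of divisors 2^a*3^b <= n explicitly, sorts it in decreasing order, and fills a value table in one pass; no recursion and no global state.
import Mathlib
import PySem

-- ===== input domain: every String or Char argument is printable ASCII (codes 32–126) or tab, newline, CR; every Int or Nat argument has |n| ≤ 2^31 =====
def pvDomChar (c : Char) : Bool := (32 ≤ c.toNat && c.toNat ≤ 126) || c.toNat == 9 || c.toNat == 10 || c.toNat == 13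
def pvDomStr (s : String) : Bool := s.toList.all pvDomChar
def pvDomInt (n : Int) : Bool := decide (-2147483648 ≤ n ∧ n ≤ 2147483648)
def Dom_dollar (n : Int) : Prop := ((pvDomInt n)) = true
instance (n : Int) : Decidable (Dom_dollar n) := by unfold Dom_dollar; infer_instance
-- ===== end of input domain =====

-- B replaces A's top-down recursion memoized in a global dict by a bottom-up table filled
-- over the explicitly generated divisor set {2^a*3^b ≤ n}; A also mutates the module-level
-- dict `a` (a side effect B does not reproduce): the equivalence is about return values.

-- ===== PORT A =====
-- A's global memo dict `a` is threaded through the recursion as state; each top-level call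
-- starts from the empty dict (A's persisted memo only ever holds values the recurrence
-- itself produces, so the return value is the same).  int(n / 2) truncates toward zero:
-- Int.tdiv; exact on Dom, where |n| ≤ 2^31 keeps the float division from rounding across
-- an integer boundary.
def dollarGo (n : Int) (d : PySem.Dict Int Int) : Int × PySem.Dict Int Int :=
  if _hn : n ≤ 11 then
    let d' := d.insert n n          -- a[n] = n
    (d'.getD n 0, d')               -- return a[n]
  else
    match d.get? n with             -- if n in a: return a[n]
    | some v => (v, d)
    | none =>
      let res2 := dollarGo (n.tdiv 2) d
      let res3 := dollarGo (n.tdiv 3) res2.2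
      let res4 := dollarGo (n.tdiv 4) res3.2
      let d' := res4.2.insert n (max n (res2.1 + res3.1 + res4.1))   -- a[n] = max(...)
      (d'.getD n 0, d')             -- return a[n]
termination_by n.toNat
decreasing_by
  all_goals
    rw [Int.tdiv_eq_ediv_of_nonneg (by omega)]
    omega

def dollar (n : Int) : Int := (dollarGo n PySem.Dict.empty).1

-- ===== PORT B =====
-- inner while loop: q = p; while q <= n: divs.append(q); q *= 3
def divsQ (n q : Int) : List Int :=
  if h : 0 < q ∧ q ≤ n then q :: divsQ n (3 * q) else []
termination_by (n + 1 - q).toNat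
decreasing_by omega

-- outer while loop: p = 1; while p <= n: <inner loop>; p *= 2
def divsP (n p : Int) : List Int :=
  if _h : 0 < p ∧ p ≤ n then divsQ n p ++ divsP n (2 * p) else []
termination_by (n + 1 - p).toNat
decreasing_by omega

-- the dict lookups val[2*d], val[3*d], val[4*d], val[1] always hit (proved below);
-- `.getD … 0` / `.get? … |>.getD 0` is that lookup, with an arbitrary default on the dead branch.
def dollar_alt (n : Int) : Int :=
  if n ≤ 11 then n
  else
    let divs := divsP n 1
    let val :=
      (PySem.List.sorted divs (fun x => x) true).foldl
        (fun val d =>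
          let m := PySem.Int.floordiv n d
          val.insert d
            (if m ≤ 11 then m
             else max m (val.getD (2 * d) 0 + val.getD (3 * d) 0 + val.getD (4 * d) 0)))
        PySem.Dict.empty
    (val.get? 1).getD 0

-- ===== PRECONDITION & SPEC =====
def Spec_dollar (n : Int) (out : Int) : Prop := out = dollar_alt n
instance (n : Int) (out : Int) : Decidable (Spec_dollar n out) := by unfold Spec_dollar; infer_instance

-- ===== CLAIM (what is proved, stated in full; the proofs are below) =====
def Claim_equal_dollar : Prop := ∀ (n : Int), Dom_dollar n → Spec_dollar n (dollar n)

-- ===== LEMMAS AND PROOFS =====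

-- the recurrence both programs compute, as a plain recursion (proof-side reference)
def fRec (n : Int) : Int :=
  if n ≤ 11 then n
  else max n (fRec (n / 2) + fRec (n / 3) + fRec (n / 4))
termination_by n.toNat
decreasing_by all_goals omega

theorem fRec_le {n : Int} (h : n ≤ 11) : fRec n = n := by
  rw [fRec]; simp [h]

theorem fRec_gt {n : Int} (h : ¬ n ≤ 11) :
    fRec n = max n (fRec (n / 2) + fRec (n / 3) + fRec (n / 4)) := by
  rw [fRec]; simp [h]

-- ---------- A computes fRec ----------

def MemoOK (d : PySem.Dict Int Int) : Prop :=
  ∀ k v, d.get? k = some v → v = fRec k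

theorem memoOK_insert {d : PySem.Dict Int Int} {k v : Int} (hd : MemoOK d)
    (hv : v = fRec k) : MemoOK (d.insert k v) := by
  intro k' v' h
  rcases eq_or_ne k' k with rfl | hne
  · rw [PySem.Dict.get?_insert_self] at h
    cases h; exact hv
  · rw [PySem.Dict.get?_insert_of_ne _ _ hne] at h
    exact hd k' v' h

theorem dollarGo_correct (n : Int) (d : PySem.Dict Int Int) (hd : MemoOK d) :
    (dollarGo n d).1 = fRec n ∧ MemoOK (dollarGo n d).2 := by
  rw [dollarGo]
  by_cases hn : n ≤ 11
  · simp only [dif_pos hn]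
    refine ⟨?_, memoOK_insert hd (fRec_le hn).symm⟩
    simp [PySem.Dict.getD_insert_self, fRec_le hn]
  · simp only [dif_neg hn]
    cases hg : d.get? n with
    | some v => exact ⟨hd n v hg, hd⟩
    | none =>
      have e2 : n.tdiv 2 = n / 2 := Int.tdiv_eq_ediv_of_nonneg (by omega)
      have e3 : n.tdiv 3 = n / 3 := Int.tdiv_eq_ediv_of_nonneg (by omega)
      have e4 : n.tdiv 4 = n / 4 := Int.tdiv_eq_ediv_of_nonneg (by omega)
      have h2 := dollarGo_correct (n.tdiv 2) d hd
      have h3 := dollarGo_correct (n.tdiv 3) (dollarGo (n.tdiv 2) d).2 h2.2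
      have h4 := dollarGo_correct (n.tdiv 4) (dollarGo (n.tdiv 3) (dollarGo (n.tdiv 2) d).2).2 h3.2
      have hval : max n ((dollarGo (n.tdiv 2) d).1 +
          (dollarGo (n.tdiv 3) (dollarGo (n.tdiv 2) d).2).1 +
          (dollarGo (n.tdiv 4) (dollarGo (n.tdiv 3) (dollarGo (n.tdiv 2) d).2).2).1) = fRec n := by
        rw [h2.1, h3.1, h4.1, e2, e3, e4, fRec_gt hn]
      refine ⟨?_, memoOK_insert h4.2 hval⟩
      simp only [PySem.Dict.getD_insert_self]
      exact hval
termination_by n.toNat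
decreasing_by
  all_goals
    rw [Int.tdiv_eq_ediv_of_nonneg (by omega)]
    omega

-- ---------- B computes fRec ----------

theorem mem_divsQ (n q x : Int) (hq : 0 < q) :
    x ∈ divsQ n q ↔ ∃ b : Nat, x = q * 3 ^ b ∧ x ≤ n := by
  rw [divsQ]
  by_cases h : q ≤ n
  · rw [dif_pos ⟨hq, h⟩]
    simp only [List.mem_cons]
    constructor
    · rintro (rfl | hx)
      · exact ⟨0, by ring, h⟩
      · obtain ⟨b, rfl, hle⟩ := (mem_divsQ n (3 * q) x (by omega)).mp hx
        exact ⟨b + 1, by ring, hle⟩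
    · rintro ⟨b, rfl, hle⟩
      cases b with
      | zero => left; ring
      | succ b =>
        right
        exact (mem_divsQ n (3 * q) _ (by omega)).mpr ⟨b, by ring, hle⟩
  · rw [dif_neg (by tauto)]
    simp only [List.not_mem_nil, false_iff, not_exists]
    rintro b ⟨rfl, hle⟩
    have h1 : (1 : Int) ≤ 3 ^ b := one_le_pow₀ (by norm_num)
    nlinarith
termination_by (n + 1 - q).toNat
decreasing_by all_goals omega

theorem mem_divsP (n p x : Int) (hp : 0 < p) :
    x ∈ divsP n p ↔ ∃ a b : Nat, x = p * 2 ^ a * 3 ^ b ∧ x ≤ n := by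
  rw [divsP]
  by_cases h : p ≤ n
  · rw [dif_pos ⟨hp, h⟩]
    simp only [List.mem_append]
    constructor
    · rintro (hx | hx)
      · obtain ⟨b, rfl, hle⟩ := (mem_divsQ n p x hp).mp hx
        exact ⟨0, b, by ring, hle⟩
      · obtain ⟨a, b, rfl, hle⟩ := (mem_divsP n (2 * p) x (by omega)).mp hx
        exact ⟨a + 1, b, by ring, hle⟩
    · rintro ⟨a, b, rfl, hle⟩
      cases a with
      | zero => left; exact (mem_divsQ n p _ hp).mpr ⟨b, by ring, hle⟩
      | succ a =>
        right
        exact (mem_divsP n (2 * p) _ (by omega)).mpr ⟨a, b, by ring, hle⟩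
  · rw [dif_neg (by tauto)]
    simp only [List.not_mem_nil, false_iff, not_exists]
    rintro a b ⟨rfl, hle⟩
    have h1 : (1 : Int) ≤ 2 ^ a := one_le_pow₀ (by norm_num)
    have h2 : (1 : Int) ≤ 3 ^ b := one_le_pow₀ (by norm_num)
    have h12 : (1 : Int) ≤ 2 ^ a * 3 ^ b := by nlinarith
    have h3 : p ≤ p * (2 ^ a * 3 ^ b) := le_mul_of_one_le_right hp.le h12
    have heq : p * 2 ^ a * 3 ^ b = p * (2 ^ a * 3 ^ b) := by ring
    omega
termination_by (n + 1 - p).toNat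
decreasing_by all_goals omega

-- the loop body of B's table-filling pass
def bStep (n : Int) (val : PySem.Dict Int Int) (d : Int) : PySem.Dict Int Int :=
  let m := PySem.Int.floordiv n d
  val.insert d
    (if m ≤ 11 then m
     else max m (val.getD (2 * d) 0 + val.getD (3 * d) 0 + val.getD (4 * d) 0))

theorem fold_inv (n : Int) (L : List Int)
    (hmem : ∀ x ∈ L, 0 < x ∧ x ≤ n)
    (hcl : ∀ d ∈ L, 12 * d ≤ n → (2 * d ∈ L ∧ 3 * d ∈ L ∧ 4 * d ∈ L))
    (hPW : L.Pairwise (fun a b => b ≤ a)) :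
    ∀ (rest P : List Int) (val : PySem.Dict Int Int), L = P ++ rest →
    (∀ k v, val.get? k = some v → v = fRec (n / k)) →
    (∀ k, k ∈ P → (val.get? k).isSome = true) →
    (∀ k v, (rest.foldl (bStep n) val).get? k = some v → v = fRec (n / k)) ∧
    (∀ k, k ∈ L → ((rest.foldl (bStep n) val).get? k).isSome = true) := by
  intro rest
  induction rest with
  | nil =>
    intro P val hL h1 h2
    refine ⟨h1, ?_⟩
    intro k hk
    exact h2 k (by simpa [hL] using hk)
  | cons d rest ih =>
    intro P val hL h1 h2
    have hdL : d ∈ L := by rw [hL]; simp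
    obtain ⟨hdpos, hdle⟩ := hmem d hdL
    have hfd : PySem.Int.floordiv n d = n / d := PySem.Int.floordiv_eq_ediv_of_pos hdpos
    -- every element at or after d in L is ≤ d
    have htail : ∀ y ∈ d :: rest, y ≤ d := by
      have hsub : (d :: rest).Sublist L := by
        rw [hL]; exact List.sublist_append_right P (d :: rest)
      have hp : (d :: rest).Pairwise (fun a b => b ≤ a) := hPW.sublist hsub
      intro y hy
      rcases List.mem_cons.mp hy with rfl | hy'
      · exact le_refl y
      · exact (List.pairwise_cons.mp hp).1 y hy'
    have hinP : ∀ x ∈ L, d < x → x ∈ P := by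
      intro x hx hdx
      rw [hL] at hx
      rcases List.mem_append.mp hx with hx' | hx'
      · exact hx'
      · exact absurd (htail x hx') (by omega)
    -- the value stored for d is fRec (n / d)
    have hbody : (if PySem.Int.floordiv n d ≤ 11 then PySem.Int.floordiv n d
        else max (PySem.Int.floordiv n d)
          (val.getD (2 * d) 0 + val.getD (3 * d) 0 + val.getD (4 * d) 0)) = fRec (n / d) := by
      rw [hfd]
      by_cases hm : n / d ≤ 11
      · rw [if_pos hm, fRec_le hm]
      · rw [if_neg hm]
        have h12 : 12 * d ≤ n := by
          have := (Int.le_ediv_iff_mul_le hdpos).mp (by omega : (12 : Int) ≤ n / d)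
          omega
        obtain ⟨hc2, hc3, hc4⟩ := hcl d hdL h12
        have lookup : ∀ c : Int, c * d ∈ L → d < c * d →
            val.getD (c * d) 0 = fRec (n / (c * d)) := by
          intro c hcL hlt
          have hP := hinP _ hcL hlt
          have hsome := h2 _ hP
          obtain ⟨v, hv⟩ := Option.isSome_iff_exists.mp hsome
          rw [PySem.Dict.getD_eq_get?_getD, hv]
          exact h1 _ v hv
        have l2 : val.getD (2 * d) 0 = fRec (n / (2 * d)) := lookup 2 hc2 (by omega)
        have l3 : val.getD (3 * d) 0 = fRec (n / (3 * d)) := lookup 3 hc3 (by omega)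
        have l4 : val.getD (4 * d) 0 = fRec (n / (4 * d)) := lookup 4 hc4 (by omega)
        rw [l2, l3, l4, fRec_gt hm]
        have ed : ∀ c : Int, 0 < c → n / d / c = n / (c * d) := by
          intro c hc
          rw [Int.ediv_ediv_of_nonneg hdpos.le, mul_comm]
        rw [ed 2 (by omega), ed 3 (by omega), ed 4 (by omega)]
    have h1' : ∀ k v, (bStep n val d).get? k = some v → v = fRec (n / k) := by
      intro k v h
      simp only [bStep] at h
      rcases eq_or_ne k d with rfl | hne
      · rw [PySem.Dict.get?_insert_self] at h
        cases h
        exact hbody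
      · rw [PySem.Dict.get?_insert_of_ne _ _ hne] at h
        exact h1 k v h
    have h2' : ∀ k, k ∈ P ++ [d] → ((bStep n val d).get? k).isSome = true := by
      intro k hk
      simp only [bStep]
      rcases eq_or_ne k d with rfl | hne
      · rw [PySem.Dict.get?_insert_self]; rfl
      · rw [PySem.Dict.get?_insert_of_ne _ _ hne]
        rcases List.mem_append.mp hk with hk' | hk'
        · exact h2 k hk'
        · simp at hk'; exact absurd hk' hne
    have hL' : L = (P ++ [d]) ++ rest := by rw [hL]; simp
    simpa using ih (P ++ [d]) (bStep n val d) hL' h1' h2'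

theorem dollar_alt_eq_fRec (n : Int) : dollar_alt n = fRec n := by
  unfold dollar_alt
  by_cases hn : n ≤ 11
  · rw [if_pos hn, fRec_le hn]
  · rw [if_neg hn]
    set L := PySem.List.sorted (divsP n 1) (fun x => x) true with hLdef
    have hchar : ∀ x : Int, x ∈ L ↔ ∃ a b : Nat, x = 2 ^ a * 3 ^ b ∧ x ≤ n := by
      intro x
      rw [hLdef, PySem.List.mem_sorted, mem_divsP n 1 x (by omega)]
      simp [one_mul]
    have hmem : ∀ x ∈ L, 0 < x ∧ x ≤ n := by
      intro x hx
      obtain ⟨a, b, rfl, hle⟩ := (hchar x).mp hx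
      exact ⟨by positivity, hle⟩
    have hcl : ∀ d ∈ L, 12 * d ≤ n → (2 * d ∈ L ∧ 3 * d ∈ L ∧ 4 * d ∈ L) := by
      intro d hd h12
      obtain ⟨a, b, rfl, _⟩ := (hchar d).mp hd
      have hp : (0 : Int) < 2 ^ a * 3 ^ b := by positivity
      refine ⟨(hchar _).mpr ⟨a + 1, b, by ring, by omega⟩,
        (hchar _).mpr ⟨a, b + 1, by ring, by omega⟩,
        (hchar _).mpr ⟨a + 2, b, by ring, by omega⟩⟩
    have hPW : L.Pairwise (fun a b => b ≤ a) := PySem.List.sorted_pairwise_rev _ _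
    have h1L : (1 : Int) ∈ L := (hchar 1).mpr ⟨0, 0, by ring, by omega⟩
    have := fold_inv n L hmem hcl hPW L [] PySem.Dict.empty (by simp)
      (by intro k v h; rw [PySem.Dict.get?_empty] at h; cases h)
      (by intro k hk; cases hk)
    obtain ⟨hval, hsome⟩ := this
    obtain ⟨v, hv⟩ := Option.isSome_iff_exists.mp (hsome 1 h1L)
    show ((L.foldl (bStep n) PySem.Dict.empty).get? 1).getD 0 = fRec n
    rw [hv]
    have := hval 1 v hv
    simpa using this

-- ===== VERDICT (by name: the statement is the Claim_ definition above) =====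
theorem dollar_spec : Claim_equal_dollar := by
  intro n _
  unfold Spec_dollar
  rw [dollar_alt_eq_fRec]
  unfold dollar
  exact (dollarGo_correct n PySem.Dict.empty
    (by intro k v h; rw [PySem.Dict.get?_empty] at h; cases h)).1
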